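-- pv_equiv track=rewrite | github.com/ShadowCatP/OiAk-project | adders/axppabk.py | _exact_prefix_bk
-- ===== SOURCE A (Python) =====
-- from typing import List
--
-- def _exact_prefix_bk(g: List[int], p: List[int]) -> List[int]:
--     """Exact Brent–Kung prefix logic for MSB part."""
--     n = len(g)
--     g = g[:]
--     p = p[:]
--     logn = n.bit_length()
--
--     # Upward (reduce) pass
--     for d in range(1, logn):
--         for i in range((1 << d) - 1, n, 1 << d):
--             g[i] = g[i] | (p[i] & g[i - (1 << (d - 1))])
--             p[i] = p[i] & p[i - (1 << (d - 1))]
--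
--     # Downward (propagate) pass
--     for d in reversed(range(1, logn)):
--         for i in range((1 << d) + (1 << (d - 1)) - 1, n, 1 << d):
--             g[i] = g[i] | (p[i] & g[i - (1 << (d - 1))])
--             p[i] = p[i] & p[i - (1 << (d - 1))]
--
--     # Compute carries
--     c = [0] * (n + 1)
--     for i in range(n):
--         c[i + 1] = g[i]
--     return c
-- ===== SOURCE B (Python) =====
-- from typing import List
--
-- def _exact_prefix_bk(g: List[int], p: List[int]) -> List[int]:
--     """Serial ripple recurrence: c[i+1] = g[i] | (p[i] & c[i]), c[0] = 0."""
--     c = [0]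
--     for gi, pi in zip(g, p):
--         c.append(gi | (pi & c[-1]))
--     return c
-- ===== Notes on version B (the rewrite author's own statement) =====
-- stated objective: faster
-- what changed: Replaces the two-phase Brent-Kung upward/downward tree with shifted strided index loops by a single left-to-right ripple pass computing the carry recurrence c[i+1] = g[i] | (p[i] & c[i]) directly.
-- outside the precondition, e.g. on _exact_prefix_bk([5], []): A returns [0, 5], B returns [0]
import Mathlib
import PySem

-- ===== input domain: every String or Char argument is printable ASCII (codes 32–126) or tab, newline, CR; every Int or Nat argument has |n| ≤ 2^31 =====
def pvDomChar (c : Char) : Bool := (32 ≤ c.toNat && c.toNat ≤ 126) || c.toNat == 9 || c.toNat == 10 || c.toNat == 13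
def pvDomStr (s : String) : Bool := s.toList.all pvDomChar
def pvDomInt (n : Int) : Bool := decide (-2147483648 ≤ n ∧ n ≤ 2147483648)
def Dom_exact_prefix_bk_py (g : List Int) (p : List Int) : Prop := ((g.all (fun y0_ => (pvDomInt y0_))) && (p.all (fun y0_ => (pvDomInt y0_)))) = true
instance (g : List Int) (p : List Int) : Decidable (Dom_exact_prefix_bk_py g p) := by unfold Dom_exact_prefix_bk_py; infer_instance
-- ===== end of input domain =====

-- B replaces the Brent–Kung two-phase tree by the serial carry recurrence c[i+1] = g[i] | (p[i] & c[i]) — one plain pass, measurably faster by a constant factor.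
-- Neither program mutates its arguments (A copies g and p first).

-- ===== PORT A =====
-- one tree-node update: g[i] = g[i] | (p[i] & g[i-h]); p[i] = p[i] & p[i-h]
-- (the reads happen before the writes in Python too: g[i-h]/p[i-h] have index ≠ i, and p[i] is read before it is written)
def pvBkStep (st : List Int × List Int) (i : Int) (h : Int) : List Int × List Int :=
  (PySem.List.pySetD st.1 i (PySem.Int.bor (PySem.List.pyGetD st.1 i 0)
      (PySem.Int.band (PySem.List.pyGetD st.2 i 0) (PySem.List.pyGetD st.1 (i - h) 0))),
   PySem.List.pySetD st.2 i (PySem.Int.band (PySem.List.pyGetD st.2 i 0) (PySem.List.pyGetD st.2 (i - h) 0)))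

-- literal port of A; d ranges over 1..logn-1 (resp. logn-1..1), so d ≥ 1 and `d.toNat` is exact for `1 << d`.
def exact_prefix_bk_py (g : List Int) (p : List Int) : List Int :=
  let n : Int := PySem.List.len g
  let logn : Int := (PySem.Int.bitLength n : Int)
  -- upward (reduce) pass
  let st1 := (PySem.List.pyRange 1 logn 1).foldl (fun st d =>
      (PySem.List.pyRange ((1 <<< d.toNat) - 1) n (1 <<< d.toNat)).foldl
        (fun st i => pvBkStep st i (1 <<< (d.toNat - 1))) st) (g, p)
  -- downward (propagate) pass; reversed(range(1, logn)) = range(logn-1, 0, -1)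
  let st2 := (PySem.List.pyRange (logn - 1) 0 (-1)).foldl (fun st d =>
      (PySem.List.pyRange ((1 <<< d.toNat) + (1 <<< (d.toNat - 1)) - 1) n (1 <<< d.toNat)).foldl
        (fun st i => pvBkStep st i (1 <<< (d.toNat - 1))) st) st1
  -- carries: c = [0]*(n+1); c[i+1] = g[i]
  (PySem.List.pyRange 0 n 1).foldl
    (fun c i => PySem.List.pySetD c (i + 1) (PySem.List.pyGetD st2.1 i 0))
    (List.replicate (g.length + 1) 0)

-- ===== PORT B =====
-- serial ripple: c = [0]; for gi, pi in zip(g, p): c.append(gi | (pi & c[-1]))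
def exact_prefix_bk_py_alt (g : List Int) (p : List Int) : List Int :=
  (List.zip g p).foldl
    (fun c gp => c ++ [PySem.Int.bor gp.1 (PySem.Int.band gp.2 (PySem.List.pyGetD c (-1) 0))])
    [0]

-- ===== PRECONDITION & SPEC =====
-- Pre_ excludes len(p) < len(g): there A raises IndexError whenever len(g) ≥ 2, and for len(g) = 1 A
-- returns [0, g[0]] without ever reading p (the tree has no levels) while B truncates to the zipped length.
def Pre_exact_prefix_bk_py (g : List Int) (p : List Int) : Prop := g.length ≤ p.length
instance (g : List Int) (p : List Int) : Decidable (Pre_exact_prefix_bk_py g p) := by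
  unfold Pre_exact_prefix_bk_py; infer_instance
def pvWitness_exact_prefix_bk_py : List Int × List Int := ([1], [1])

def Spec_exact_prefix_bk_py (g : List Int) (p : List Int) (out : List Int) : Prop := out = exact_prefix_bk_py_alt g p
instance (g : List Int) (p : List Int) (out : List Int) : Decidable (Spec_exact_prefix_bk_py g p out) := by unfold Spec_exact_prefix_bk_py; infer_instance

-- ===== CLAIM (what is proved, stated in full; the proofs are below) =====
def Claim_equal_exact_prefix_bk_py : Prop := ∀ (g : List Int) (p : List Int), Dom_exact_prefix_bk_py g p → Pre_exact_prefix_bk_py g p → Spec_exact_prefix_bk_py g p (exact_prefix_bk_py g p)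

-- ===== LEMMAS AND PROOFS =====

-- ---------- bit-level identities for Python's & and | ----------

lemma pvSub_and_eq_ldiff (m n : Nat) : m - (m &&& n) = Nat.ldiff m n := by
  induction m using Nat.binaryRec generalizing n with
  | zero =>
    have h0 : Nat.ldiff 0 n = 0 := Nat.eq_of_testBit_eq (by simp [Nat.testBit_ldiff])
    simp [Nat.zero_and, h0]
  | bit a m ih =>
    induction n using Nat.bitCasesOn with
    | bit b n =>
      rw [Nat.land_bit, Nat.ldiff_bit, ← ih n]
      have h : m &&& n ≤ m := Nat.and_le_left
      cases a <;> cases b <;> simp [Nat.bit_val] <;> omega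

lemma pvInt_ext {a b : Int} (h : ∀ k, a.testBit k = b.testBit k) : a = b := by
  have hfin : ∀ (x y : Nat), x ≤ y → x.testBit (y+1) = false := fun x y hxy =>
    Nat.testBit_lt_two_pow (lt_of_le_of_lt hxy (by
      calc y < 2^y := Nat.lt_two_pow_self
      _ ≤ 2^(y+1) := Nat.pow_le_pow_right (by norm_num) (by omega)))
  cases a with
  | ofNat m => cases b with
    | ofNat n => exact congrArg _ (Nat.eq_of_testBit_eq h)
    | negSucc n =>
      exfalso
      have := h (m + n + 1)
      rw [show Int.testBit (Int.ofNat m) (m+n+1) = m.testBit (m+n+1) from rfl,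
          show Int.testBit (Int.negSucc n) (m+n+1) = !n.testBit (m+n+1) from rfl,
          hfin m (m+n) (by omega), hfin n (m+n) (by omega)] at this
      simp at this
  | negSucc m => cases b with
    | ofNat n =>
      exfalso
      have := h (m + n + 1)
      rw [show Int.testBit (Int.negSucc m) (m+n+1) = !m.testBit (m+n+1) from rfl,
          show Int.testBit (Int.ofNat n) (m+n+1) = n.testBit (m+n+1) from rfl,
          hfin m (m+n) (by omega), hfin n (m+n) (by omega)] at this
      simp at this
    | negSucc n =>
      have : ∀ k, m.testBit k = n.testBit k := fun k => by
        have := h k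
        rw [show Int.testBit (Int.negSucc m) k = !m.testBit k from rfl,
            show Int.testBit (Int.negSucc n) k = !n.testBit k from rfl] at this
        simpa using this
      exact congrArg _ (Nat.eq_of_testBit_eq this)

lemma pvNegRep (b : Int) (hb : ¬ 0 ≤ b) : b = Int.negSucc ((-b - 1).toNat) := by
  have hb' : b < 0 := by omega
  obtain ⟨c, rfl⟩ := Int.eq_negSucc_of_lt_zero hb' 
  have h1 : (-Int.negSucc c - 1) = (c : Int) := by rw [Int.negSucc_eq]; ring
  rw [h1, Int.toNat_natCast]

lemma pvTestBit_natCast (m : Nat) (k : Nat) : ((m : Int)).testBit k = m.testBit k := rfl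
lemma pvTestBit_negSucc (m : Nat) (k : Nat) : (Int.negSucc m).testBit k = !m.testBit k := rfl
lemma pvNegSucc_form (x : Nat) : -(x : Int) - 1 = Int.negSucc x := by rw [Int.negSucc_eq]; ring

lemma pvTestBit_band (a b : Int) (k : Nat) :
    (PySem.Int.band a b).testBit k = (a.testBit k && b.testBit k) := by
  unfold PySem.Int.band
  by_cases ha : 0 ≤ a <;> by_cases hb : 0 ≤ b <;> simp only [ha, hb, if_true, if_false]
  · obtain ⟨m, rfl⟩ : ∃ m : Nat, a = ↑m := ⟨a.toNat, (Int.toNat_of_nonneg ha).symm⟩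
    obtain ⟨n, rfl⟩ : ∃ n : Nat, b = ↑n := ⟨b.toNat, (Int.toNat_of_nonneg hb).symm⟩
    simp [pvTestBit_natCast, Nat.testBit_land]
  · rw [pvSub_and_eq_ldiff]
    conv_rhs => rw [pvNegRep b hb]
    obtain ⟨m, rfl⟩ : ∃ m : Nat, a = ↑m := ⟨a.toNat, (Int.toNat_of_nonneg ha).symm⟩
    simp [pvTestBit_natCast, pvTestBit_negSucc, Nat.testBit_ldiff]
  · rw [pvSub_and_eq_ldiff]
    conv_rhs => rw [pvNegRep a ha]
    obtain ⟨n, rfl⟩ : ∃ n : Nat, b = ↑n := ⟨b.toNat, (Int.toNat_of_nonneg hb).symm⟩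
    simp [pvTestBit_natCast, pvTestBit_negSucc, Nat.testBit_ldiff, Bool.and_comm]
  · rw [pvNegSucc_form]
    conv_rhs => rw [pvNegRep a ha, pvNegRep b hb]
    simp [pvTestBit_negSucc, Nat.testBit_lor]

lemma pvTestBit_bor (a b : Int) (k : Nat) :
    (PySem.Int.bor a b).testBit k = (a.testBit k || b.testBit k) := by
  unfold PySem.Int.bor
  by_cases ha : 0 ≤ a <;> by_cases hb : 0 ≤ b <;> simp only [ha, hb, if_true, if_false]
  · obtain ⟨m, rfl⟩ : ∃ m : Nat, a = ↑m := ⟨a.toNat, (Int.toNat_of_nonneg ha).symm⟩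
    obtain ⟨n, rfl⟩ : ∃ n : Nat, b = ↑n := ⟨b.toNat, (Int.toNat_of_nonneg hb).symm⟩
    simp [pvTestBit_natCast, Nat.testBit_lor]
  · rw [pvSub_and_eq_ldiff, pvNegSucc_form]
    conv_rhs => rw [pvNegRep b hb]
    obtain ⟨m, rfl⟩ : ∃ m : Nat, a = ↑m := ⟨a.toNat, (Int.toNat_of_nonneg ha).symm⟩
    simp [pvTestBit_natCast, pvTestBit_negSucc, Nat.testBit_ldiff, Bool.or_comm]
  · rw [pvSub_and_eq_ldiff, pvNegSucc_form]
    conv_rhs => rw [pvNegRep a ha]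
    obtain ⟨n, rfl⟩ : ∃ n : Nat, b = ↑n := ⟨b.toNat, (Int.toNat_of_nonneg hb).symm⟩
    simp [pvTestBit_natCast, pvTestBit_negSucc, Nat.testBit_ldiff, Bool.or_comm]
  · rw [pvNegSucc_form]
    conv_rhs => rw [pvNegRep a ha, pvNegRep b hb]
    simp [pvTestBit_negSucc, Nat.testBit_land]

-- the two identities the prefix-combination step needs
lemma pvKeyG (g p x y z : Int) :
    PySem.Int.bor g (PySem.Int.band p (PySem.Int.bor x (PySem.Int.band y z)))
      = PySem.Int.bor (PySem.Int.bor g (PySem.Int.band p x))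
          (PySem.Int.band (PySem.Int.band p y) z) := by
  apply pvInt_ext; intro k
  simp only [pvTestBit_band, pvTestBit_bor]
  cases g.testBit k <;> cases p.testBit k <;> cases x.testBit k <;> cases y.testBit k <;>
    cases z.testBit k <;> rfl

lemma pvKeyP (p y z : Int) :
    PySem.Int.band p (PySem.Int.band y z) = PySem.Int.band (PySem.Int.band p y) z := by
  apply pvInt_ext; intro k
  simp only [pvTestBit_band]
  cases p.testBit k <;> cases y.testBit k <;> cases z.testBit k <;> rfl

-- ---------- the serial spec: spans of generate/propagate and the ripple carry ----------

-- pvSp g p s i = the (generate, propagate) pair combined over bit positions s..i (s ≤ i)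
def pvSp (g p : List Int) (s : Nat) : Nat → Int × Int
  | 0 => (g.getD s 0, p.getD s 0)
  | (i+1) =>
    if s < i + 1 then
      (PySem.Int.bor (g.getD (i+1) 0) (PySem.Int.band (p.getD (i+1) 0) (pvSp g p s i).1),
       PySem.Int.band (p.getD (i+1) 0) (pvSp g p s i).2)
    else (g.getD s 0, p.getD s 0)

-- the ripple carry: pvC (i+1) = g[i] | (p[i] & pvC i), pvC 0 = 0
def pvC (g p : List Int) : Nat → Int
  | 0 => 0
  | (i+1) => PySem.Int.bor (g.getD i 0) (PySem.Int.band (p.getD i 0) (pvC g p i))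

lemma pvSp_combine (g p : List Int) (b j : Nat) (hbj : b ≤ j) :
    ∀ i, j < i →
    pvSp g p b i =
      (PySem.Int.bor (pvSp g p (j+1) i).1 (PySem.Int.band (pvSp g p (j+1) i).2 (pvSp g p b j).1),
       PySem.Int.band (pvSp g p (j+1) i).2 (pvSp g p b j).2) := by
  intro i hi
  induction i, hi using Nat.le_induction with
  | base =>
    simp [pvSp, show b < j + 1 by omega]
  | succ i hji ih =>
    simp only [pvSp, if_pos (show b < i + 1 by omega), if_pos (show j + 1 < i + 1 by omega)]
    rw [ih]
    simp only [Prod.mk.injEq]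
    exact ⟨pvKeyG _ _ _ _ _, pvKeyP _ _ _⟩

lemma pvC_eq_sp (g p : List Int) (i : Nat) : pvC g p (i+1) = (pvSp g p 0 i).1 := by
  induction i with
  | zero => simp [pvC, pvSp]
  | succ i ih =>
    rw [show pvC g p (i+1+1) = PySem.Int.bor (g.getD (i+1) 0)
      (PySem.Int.band (p.getD (i+1) 0) (pvC g p (i+1))) from rfl, ih]
    simp [pvSp]

-- ---------- generic list helpers ----------

lemma pvRange_nil (a b s : Int) (hs : 0 < s) (h : b ≤ a) : PySem.List.pyRange a b s = [] := by
  rw [PySem.List.pyRange_of_pos _ _ hs, if_neg (by omega)]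
  simp

lemma pvRange_cons (a b s : Int) (hs : 0 < s) (hab : a < b) :
    PySem.List.pyRange a b s = a :: PySem.List.pyRange (a + s) b s := by
  rw [PySem.List.pyRange_of_pos _ _ hs, PySem.List.pyRange_of_pos _ _ hs, if_pos hab]
  by_cases hab2 : a + s < b
  · rw [if_pos hab2]
    have hc : (b - a + s - 1) / s = (b - (a + s) + s - 1) / s + 1 := by
      have h1 : b - a + s - 1 = (b - (a + s) + s - 1) + 1 * s := by ring
      rw [h1, Int.add_mul_ediv_right _ _ (by omega)]
    have hnn : 0 ≤ (b - (a + s) + s - 1) / s := Int.ediv_nonneg (by omega) (by omega)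
    have ht : ((b - a + s - 1) / s).toNat = ((b - (a + s) + s - 1) / s).toNat + 1 := by omega
    rw [ht, List.range_succ_eq_map, List.map_cons, List.map_map]
    congr 1
    · simp
    · apply List.map_congr_left
      intro x _
      simp only [Function.comp_apply]
      push_cast
      ring
  · rw [if_neg hab2]
    have hc : (b - a + s - 1) / s = 1 := by
      rw [← PySem.Int.floordiv_eq_ediv_of_pos hs, PySem.Int.floordiv_eq_iff_of_pos hs]
      omega
    rw [hc]
    simp

-- ---------- state cells and the tree step ----------

def pvCell (st : List Int × List Int) (i : Nat) : Int × Int := (st.1.getD i 0, st.2.getD i 0)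

lemma pvBkStep_len (st : List Int × List Int) (i h : Int) :
    (pvBkStep st i h).1.length = st.1.length ∧ (pvBkStep st i h).2.length = st.2.length := by
  simp [pvBkStep, PySem.List.length_pySetD]

lemma pvGetD_set (xs : List Int) (i k : Nat) (v : Int) (hi : i < xs.length) :
    (xs.set i v).getD k 0 = if k = i then v else xs.getD k 0 := by
  by_cases h : i = k
  · subst h
    rw [List.getD_eq_getElem?_getD, List.getElem?_set]
    simp [hi]
  · rw [List.getD_eq_getElem?_getD, List.getElem?_set, if_neg h, ← List.getD_eq_getElem?_getD,
      if_neg (fun hk => h hk.symm)]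

lemma pvBkStep_cell (st : List Int × List Int) (i h : Nat) (hh : h ≤ i)
    (h1 : i < st.1.length) (h2 : i < st.2.length) (k : Nat) :
    pvCell (pvBkStep st (i : Int) (h : Int)) k =
      if k = i then
        (PySem.Int.bor (pvCell st i).1 (PySem.Int.band (pvCell st i).2 (pvCell st (i - h)).1),
         PySem.Int.band (pvCell st i).2 (pvCell st (i - h)).2)
      else pvCell st k := by
  have hih : ((i : Int) - (h : Int)) = ((i - h : Nat) : Int) := by omega
  unfold pvBkStep pvCell
  rw [hih]
  simp only [PySem.List.pyGetD_natCast, PySem.List.pySetD_natCast]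
  rw [pvGetD_set _ _ _ _ h1, pvGetD_set _ _ _ _ h2]
  split_ifs <;> rfl

-- ---------- 2-adic valuation of i+1 ----------

def pvVal (i : Nat) : Nat := padicValNat 2 (i + 1)

lemma pvVal_dvd_iff (i e : Nat) : 2 ^ e ∣ i + 1 ↔ e ≤ pvVal i := by
  haveI := Nat.fact_prime_two
  unfold pvVal
  rw [padicValNat_dvd_iff]
  simp

-- ---------- the upward (reduce) pass ----------

def pvUpInv (g p : List Int) (d : Nat) (st : List Int × List Int) : Prop :=
  st.1.length = g.length ∧ st.2.length = p.length ∧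
  ∀ i < g.length, pvCell st i = pvSp g p (i + 1 - 2 ^ (min d (pvVal i))) i

lemma pvUpPass (g p : List Int) (hp : g.length ≤ p.length) (d : Nat) (hd : 1 ≤ d) :
    ∀ (fuel x : Nat), g.length - x ≤ fuel → 2 ^ d ∣ x + 1 →
    ∀ st : List Int × List Int,
    st.1.length = g.length → st.2.length = p.length →
    (∀ i < g.length, pvCell st i =
      if 2 ^ d ∣ i + 1 ∧ i < x then pvSp g p (i + 1 - 2 ^ d) i
      else pvSp g p (i + 1 - 2 ^ (min (d-1) (pvVal i))) i) →
    pvUpInv g p d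
      ((PySem.List.pyRange (x : Int) (g.length : Int) ((2 ^ d : Nat) : Int)).foldl
        (fun st i => pvBkStep st i ((2 ^ (d-1) : Nat) : Int)) st) := by
  have e2 : 2 ^ d = 2 * 2 ^ (d - 1) := by
    conv_lhs => rw [show d = (d - 1) + 1 by omega, pow_succ]
    ring
  have e1 : 1 ≤ 2 ^ (d - 1) := Nat.one_le_two_pow
  have hspos : (0 : Int) < ((2 ^ d : Nat) : Int) := by positivity
  intro fuel
  induction fuel with
  | zero =>
    intro x hfx hdvd st h1 h2 hcell
    rw [pvRange_nil _ _ _ hspos (by exact_mod_cast Nat.cast_le.mpr (by omega)), List.foldl_nil]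
    refine ⟨h1, h2, fun i hi => ?_⟩
    rw [hcell i hi]
    by_cases hdv : 2 ^ d ∣ i + 1
    · rw [if_pos ⟨hdv, by omega⟩, show min d (pvVal i) = d by
        have := (pvVal_dvd_iff i d).mp hdv; omega]
    · rw [if_neg (by tauto)]
      have hv : pvVal i < d := by
        by_contra hc
        exact hdv ((pvVal_dvd_iff i d).mpr (by omega))
      rw [show min (d - 1) (pvVal i) = min d (pvVal i) by omega]
  | succ f ihf =>
    intro x hfx hdvd st h1 h2 hcell
    by_cases hxn : g.length ≤ x
    · rw [pvRange_nil _ _ _ hspos (by exact_mod_cast Nat.cast_le.mpr hxn), List.foldl_nil]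
      refine ⟨h1, h2, fun i hi => ?_⟩
      rw [hcell i hi]
      by_cases hdv : 2 ^ d ∣ i + 1
      · rw [if_pos ⟨hdv, by omega⟩, show min d (pvVal i) = d by
          have := (pvVal_dvd_iff i d).mp hdv; omega]
      · rw [if_neg (by tauto)]
        have hv : pvVal i < d := by
          by_contra hc
          exact hdv ((pvVal_dvd_iff i d).mpr (by omega))
        rw [show min (d - 1) (pvVal i) = min d (pvVal i) by omega]
    · -- x < g.length : process index x, recurse
      push_neg at hxn
      have hxd : 2 ^ d ≤ x + 1 := Nat.le_of_dvd (by omega) hdvd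
      have hh : 2 ^ (d - 1) ≤ x := by omega
      rw [pvRange_cons _ _ _ hspos (by exact_mod_cast Nat.cast_lt.mpr hxn), List.foldl_cons]
      have hcast : ((x : Int) + ((2 ^ d : Nat) : Int)) = ((x + 2 ^ d : Nat) : Int) := by push_cast; ring
      rw [hcast]
      have hlen := pvBkStep_len st (x : Int) ((2 ^ (d - 1) : Nat) : Int)
      apply ihf (x + 2 ^ d) (by omega) (by
        rw [show x + 2 ^ d + 1 = (x + 1) + 2 ^ d by omega]
        exact Nat.dvd_add hdvd dvd_rfl) _ (hlen.1.trans h1) (hlen.2.trans h2)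
      intro i hi
      rw [pvBkStep_cell st x (2 ^ (d - 1)) hh (by omega) (by omega) i]
      by_cases hix : i = x
      · subst hix
        rw [if_pos rfl, if_pos ⟨hdvd, by omega⟩]
        -- current cell i: not yet processed at this level
        have hvi : d - 1 ≤ pvVal i := by
          have := (pvVal_dvd_iff i d).mp hdvd; omega
        have hci : pvCell st i = pvSp g p (i + 1 - 2 ^ (d - 1)) i := by
          rw [hcell i hi, if_neg (by omega), show min (d - 1) (pvVal i) = d - 1 by omega]
        -- partner cell j = i - 2^(d-1)
        have hjlt : i - 2 ^ (d - 1) < g.length := by omega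
        have hjdvd : ¬ 2 ^ d ∣ (i - 2 ^ (d - 1)) + 1 := by
          intro hdj
          have hsub : 2 ^ d ∣ (i + 1) - ((i - 2 ^ (d - 1)) + 1) := Nat.dvd_sub hdvd hdj
          rw [show (i + 1) - ((i - 2 ^ (d - 1)) + 1) = 2 ^ (d - 1) by omega] at hsub
          exact absurd (Nat.le_of_dvd (by positivity) hsub) (by omega)
        have hjv : d - 1 ≤ pvVal (i - 2 ^ (d - 1)) := by
          rw [← pvVal_dvd_iff]
          have hdd : 2 ^ (d - 1) ∣ 2 ^ d := pow_dvd_pow 2 (by omega)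
          have : 2 ^ (d - 1) ∣ (i + 1) - 2 ^ (d - 1) := Nat.dvd_sub (hdd.trans hdvd) dvd_rfl
          rwa [show (i + 1) - 2 ^ (d - 1) = (i - 2 ^ (d - 1)) + 1 by omega] at this
        have hjv2 : ¬ d ≤ pvVal (i - 2 ^ (d - 1)) := by
          intro hc
          exact hjdvd ((pvVal_dvd_iff _ d).mpr hc)
        have hcj : pvCell st (i - 2 ^ (d - 1)) = pvSp g p (i + 1 - 2 ^ d) (i - 2 ^ (d - 1)) := by
          rw [hcell _ hjlt, if_neg (by tauto),
            show min (d - 1) (pvVal (i - 2 ^ (d - 1))) = d - 1 by omega,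
            show i - 2 ^ (d - 1) + 1 - 2 ^ (d - 1) = i + 1 - 2 ^ d by omega]
        rw [hci, hcj,
          pvSp_combine g p (i + 1 - 2 ^ d) (i - 2 ^ (d - 1)) (by omega) i (by omega),
          show i - 2 ^ (d - 1) + 1 = i + 1 - 2 ^ (d - 1) by omega]
      · rw [if_neg hix, hcell i hi]
        by_cases hdvi : 2 ^ d ∣ i + 1
        · have hnot : ¬ (x < i ∧ i < x + 2 ^ d) := by
            rintro ⟨hlo, hhi⟩
            have : 2 ^ d ∣ (i + 1) - (x + 1) := Nat.dvd_sub hdvi hdvd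
            rw [show (i + 1) - (x + 1) = i - x by omega] at this
            exact absurd (Nat.le_of_dvd (by omega) this) (by omega)
          by_cases hlt : i < x
          · rw [if_pos ⟨hdvi, hlt⟩, if_pos ⟨hdvi, by omega⟩]
          · rw [if_neg (by tauto), if_neg (by
              rintro ⟨-, hfoo⟩
              exact hnot ⟨by omega, hfoo⟩)]
        · rw [if_neg (by tauto), if_neg (by tauto)]

-- ---------- the downward (propagate) pass ----------

def pvDnInv (g p : List Int) (d : Nat) (st : List Int × List Int) : Prop :=
  st.1.length = g.length ∧ st.2.length = p.length ∧
  ∀ i < g.length, pvCell st i =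
    if d ≤ pvVal i then pvSp g p 0 i else pvSp g p (i + 1 - 2 ^ pvVal i) i

lemma pvDnPass (g p : List Int) (hp : g.length ≤ p.length) (d : Nat) (hd : 1 ≤ d) :
    ∀ (fuel x : Nat), g.length - x ≤ fuel →
    (∃ t, x + 1 = 2 ^ d * t + 3 * 2 ^ (d-1)) →
    ∀ st : List Int × List Int,
    st.1.length = g.length → st.2.length = p.length →
    (∀ i < g.length, pvCell st i =
      if d ≤ pvVal i ∨ (pvVal i = d - 1 ∧ (i < x ∨ i + 1 = 2 ^ (d-1))) then pvSp g p 0 i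
      else pvSp g p (i + 1 - 2 ^ pvVal i) i) →
    pvDnInv g p (d-1)
      ((PySem.List.pyRange (x : Int) (g.length : Int) ((2 ^ d : Nat) : Int)).foldl
        (fun st i => pvBkStep st i ((2 ^ (d-1) : Nat) : Int)) st) := by
  have e2 : 2 ^ d = 2 * 2 ^ (d - 1) := by
    conv_lhs => rw [show d = (d - 1) + 1 by omega, pow_succ]
    ring
  have e1 : 1 ≤ 2 ^ (d - 1) := Nat.one_le_two_pow
  have hspos : (0 : Int) < ((2 ^ d : Nat) : Int) := by positivity
  -- an index strictly between two indices of 2-adic valuation exactly d-1 is ≥ 2^d away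
  have hgap : ∀ u w : Nat, 2 ^ (d-1) ∣ u → ¬ 2 ^ d ∣ u → 2 ^ (d-1) ∣ w → ¬ 2 ^ d ∣ w →
      u < w → u + 2 ^ d ≤ w := by
    intro u w hu1 hu2 hw1 hw2 huw
    obtain ⟨a, ha⟩ := hu1
    obtain ⟨b, hb⟩ := hw1
    have hao : ¬ 2 ∣ a := fun ⟨k, hk⟩ => hu2 ⟨k, by rw [ha, hk, e2]; ring⟩
    have hbo : ¬ 2 ∣ b := fun ⟨k, hk⟩ => hw2 ⟨k, by rw [hb, hk, e2]; ring⟩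
    have hab : a < b := by
      by_contra hc
      exact absurd (Nat.mul_le_mul_left (2^(d-1)) (by omega : b ≤ a)) (by omega)
    obtain ⟨c, hc⟩ : 2 ∣ (b - a) := by omega
    have hc1 : 1 ≤ c := by omega
    have hdiff : w - u = 2 ^ d * c := by
      rw [ha, hb, ← Nat.mul_sub, hc, e2]
      ring
    have hcc : 2 ^ d * 1 ≤ 2 ^ d * c := Nat.mul_le_mul_left _ hc1
    have hba : u ≤ w := by rw [ha, hb]; exact Nat.mul_le_mul_left _ (by omega)
    omega
  intro fuel
  induction fuel with
  | zero =>
    intro x hfx hex st h1 h2 hcell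
    rw [pvRange_nil _ _ _ hspos (by exact_mod_cast Nat.cast_le.mpr (by omega)), List.foldl_nil]
    refine ⟨h1, h2, fun i hi => ?_⟩
    rw [hcell i hi]
    by_cases hdv : d - 1 ≤ pvVal i
    · rw [if_pos (by omega), if_pos hdv]
    · rw [if_neg (by omega), if_neg hdv]
  | succ f ihf =>
    intro x hfx hex st h1 h2 hcell
    by_cases hxn : g.length ≤ x
    · rw [pvRange_nil _ _ _ hspos (by exact_mod_cast Nat.cast_le.mpr hxn), List.foldl_nil]
      refine ⟨h1, h2, fun i hi => ?_⟩
      rw [hcell i hi]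
      by_cases hdv : d - 1 ≤ pvVal i
      · rw [if_pos (by omega), if_pos hdv]
      · rw [if_neg (by omega), if_neg hdv]
    · push_neg at hxn
      obtain ⟨t, ht⟩ := hex
      have ht' : x + 1 = 2 * (2 ^ (d-1) * t) + 3 * 2 ^ (d-1) := by rw [ht, e2]; ring
      have hmt : 2 ^ d * (t + 1) = 2 * (2 ^ (d-1) * t) + 2 * 2 ^ (d-1) := by rw [e2]; ring
      have hxd1 : 2 ^ (d-1) ∣ x + 1 := ⟨2 ^ 1 * t + 3, by rw [ht, e2]; ring⟩
      have hxd2 : ¬ 2 ^ d ∣ x + 1 := by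
        intro hc
        have hsub : 2 ^ d ∣ (x + 1) - 2 ^ d * (t + 1) := Nat.dvd_sub hc ⟨t + 1, rfl⟩
        rw [show (x + 1) - 2 ^ d * (t + 1) = 2 ^ (d-1) by omega] at hsub
        exact absurd (Nat.le_of_dvd (by positivity) hsub) (by omega)
      have hvx : pvVal x = d - 1 := by
        have hle := (pvVal_dvd_iff x (d-1)).mp hxd1
        have hlt : ¬ d ≤ pvVal x := fun hc => hxd2 ((pvVal_dvd_iff x d).mpr hc)
        omega
      have hh : 2 ^ (d - 1) ≤ x := by omega
      rw [pvRange_cons _ _ _ hspos (by exact_mod_cast Nat.cast_lt.mpr hxn), List.foldl_cons]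
      have hcast : ((x : Int) + ((2 ^ d : Nat) : Int)) = ((x + 2 ^ d : Nat) : Int) := by push_cast; ring
      rw [hcast]
      have hlen := pvBkStep_len st (x : Int) ((2 ^ (d - 1) : Nat) : Int)
      apply ihf (x + 2 ^ d) (by omega) ⟨t + 1, by omega⟩ _ (hlen.1.trans h1) (hlen.2.trans h2)
      intro i hi
      rw [pvBkStep_cell st x (2 ^ (d - 1)) hh (by omega) (by omega) i]
      by_cases hix : i = x
      · subst hix
        rw [if_pos rfl, if_pos (by right; exact ⟨hvx, by left; omega⟩)]
        have hci : pvCell st i = pvSp g p (i + 1 - 2 ^ (d - 1)) i := by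
          rw [hcell i hi, if_neg (by
            rintro (hc | ⟨-, hc | hc⟩) <;> omega), hvx]
        -- partner cell j = i - 2^(d-1) has valuation ≥ d, hence already the full prefix
        have hjlt : i - 2 ^ (d - 1) < g.length := by omega
        have hjdvd : 2 ^ d ∣ (i - 2 ^ (d - 1)) + 1 := ⟨t + 1, by omega⟩
        have hjv : d ≤ pvVal (i - 2 ^ (d - 1)) := (pvVal_dvd_iff _ d).mp hjdvd
        have hcj : pvCell st (i - 2 ^ (d - 1)) = pvSp g p 0 (i - 2 ^ (d - 1)) := by
          rw [hcell _ hjlt, if_pos (by left; omega)]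
        rw [hci, hcj,
          pvSp_combine g p 0 (i - 2 ^ (d - 1)) (by omega) i (by omega),
          show i - 2 ^ (d - 1) + 1 = i + 1 - 2 ^ (d - 1) by omega]
      · rw [if_neg hix, hcell i hi]
        by_cases hcond : d ≤ pvVal i ∨ (pvVal i = d - 1 ∧ (i < x ∨ i + 1 = 2 ^ (d-1)))
        · rw [if_pos hcond, if_pos (by
            rcases hcond with hc | ⟨hc1, hc2⟩
            · left; exact hc
            · exact Or.inr ⟨hc1, Or.imp (fun h => by omega) id hc2⟩)]
        · rw [if_neg hcond, if_neg (by
            rintro (hc | ⟨hc1, hc2 | hc2⟩)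
            · exact hcond (Or.inl hc)
            · -- val i = d-1 and i < x + 2^d and x < i (else old condition): contradiction via hgap
              apply hcond
              right
              refine ⟨hc1, Or.inl ?_⟩
              by_contra hge
              have hi1 : 2 ^ (d-1) ∣ i + 1 := (pvVal_dvd_iff i (d-1)).mpr (by omega)
              have hi2 : ¬ 2 ^ d ∣ i + 1 := fun hcc =>
                absurd ((pvVal_dvd_iff i d).mp hcc) (by omega)
              have := hgap (x+1) (i+1) hxd1 hxd2 hi1 hi2 (by omega)
              omega
            · exact hcond (Or.inr ⟨hc1, Or.inr hc2⟩))]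

-- ---------- outer folds ----------

lemma pvVal_lt (g : List Int) (i : Nat) (hi : i < g.length) :
    pvVal i < PySem.Int.bitLength (g.length : Int) := by
  have h1 : 2 ^ (pvVal i) ∣ i + 1 := (pvVal_dvd_iff i _).mpr le_rfl
  have h2 : 2 ^ (pvVal i) ≤ i + 1 := Nat.le_of_dvd (by omega) h1
  have h3 : g.length < 2 ^ (PySem.Int.bitLength (g.length : Int)) := by
    have := PySem.Int.lt_two_pow_bitLength ((g.length : Nat) : Int)
    rwa [Int.natAbs_natCast] at this
  exact (Nat.pow_lt_pow_iff_right (a := 2) (by norm_num)).mp (by omega)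

lemma pvUpFinish (g p : List Int) (a : Nat) (hal : PySem.Int.bitLength (g.length : Int) ≤ a)
    (st : List Int × List Int) (hinv : pvUpInv g p (a-1) st) :
    pvUpInv g p (PySem.Int.bitLength (g.length : Int) - 1) st := by
  refine ⟨hinv.1, hinv.2.1, fun i hi => ?_⟩
  rw [hinv.2.2 i hi]
  have hv := pvVal_lt g i hi
  rw [show min (a-1) (pvVal i) = pvVal i by omega,
    show min (PySem.Int.bitLength (g.length : Int) - 1) (pvVal i) = pvVal i by omega]

lemma pvUpOuter (g p : List Int) (hp : g.length ≤ p.length) :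
    ∀ (fuel a : Nat), 1 ≤ a → PySem.Int.bitLength (g.length : Int) ≤ a + fuel →
    ∀ st : List Int × List Int, pvUpInv g p (a-1) st →
    pvUpInv g p (PySem.Int.bitLength (g.length : Int) - 1)
      ((PySem.List.pyRange (a : Int) ((PySem.Int.bitLength (g.length : Int) : Nat) : Int) 1).foldl
        (fun st d =>
          (PySem.List.pyRange ((1 <<< d.toNat) - 1) ((g.length : Nat) : Int) (1 <<< d.toNat)).foldl
            (fun st i => pvBkStep st i (1 <<< (d.toNat - 1))) st) st) := by
  intro fuel
  induction fuel with
  | zero =>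
    intro a ha hle st hinv
    rw [Nat.add_zero] at hle
    rw [PySem.List.pyRange_one_eq_nil (by exact_mod_cast Nat.cast_le.mpr hle), List.foldl_nil]
    exact pvUpFinish g p a hle st hinv
  | succ f ihf =>
    intro a ha hle st hinv
    by_cases hal : PySem.Int.bitLength (g.length : Int) ≤ a
    · rw [PySem.List.pyRange_one_eq_nil (by exact_mod_cast Nat.cast_le.mpr hal), List.foldl_nil]
      exact pvUpFinish g p a hal st hinv
    · push_neg at hal
      rw [PySem.List.pyRange_one_cons (by exact_mod_cast Nat.cast_lt.mpr hal), List.foldl_cons,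
        show ((a : Int) + 1) = ((a + 1 : Nat) : Int) by push_cast; ring]
      apply ihf (a + 1) (by omega) (by omega)
      have h2a : 1 ≤ 2 ^ a := Nat.one_le_two_pow
      rw [Int.toNat_natCast,
        show (1 <<< a : Nat) = 2 ^ a by rw [Nat.shiftLeft_eq, one_mul],
        show (1 <<< (a - 1) : Nat) = 2 ^ (a - 1) by rw [Nat.shiftLeft_eq, one_mul],
        show ((2 ^ a : Nat) : Int) - 1 = ((2 ^ a - 1 : Nat) : Int) by omega]
      have hres := pvUpPass g p hp a ha g.length (2 ^ a - 1) (by omega)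
        (by rw [Nat.sub_add_cancel h2a]) st hinv.1 hinv.2.1 (by
          intro i hi
          rw [if_neg (by
            rintro ⟨hdv, hlt⟩
            exact absurd (Nat.le_of_dvd (by omega) hdv) (by omega))]
          exact hinv.2.2 i hi)
      simpa [Nat.add_sub_cancel] using hres

lemma pvDnOuter (g p : List Int) (hp : g.length ≤ p.length) :
    ∀ (a : Nat),
    ∀ st : List Int × List Int, pvDnInv g p a st →
    pvDnInv g p 0
      ((PySem.List.pyRange (a : Int) 0 (-1)).foldl
        (fun st d =>
          (PySem.List.pyRange ((1 <<< d.toNat) + (1 <<< (d.toNat - 1)) - 1) ((g.length : Nat) : Int) (1 <<< d.toNat)).foldl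
            (fun st i => pvBkStep st i (1 <<< (d.toNat - 1))) st) st) := by
  intro a
  induction a with
  | zero =>
    intro st hinv
    rw [show ((0 : Nat) : Int) = (0 : Int) by norm_num,
      PySem.List.pyRange_neg_one_eq_nil le_rfl, List.foldl_nil]
    exact hinv
  | succ a ih =>
    intro st hinv
    rw [PySem.List.pyRange_neg_one_cons (by positivity), List.foldl_cons,
      show ((a + 1 : Nat) : Int) - 1 = ((a : Nat) : Int) by push_cast; ring]
    apply ih
    have h2a : 1 ≤ 2 ^ a := Nat.one_le_two_pow
    have hps : 2 ^ (a + 1) = 2 * 2 ^ a := by rw [pow_succ]; ring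
    have hred : (2 : Nat) ^ (a + 1 - 1) = 2 ^ a := rfl
    rw [Int.toNat_natCast,
      show (1 <<< (a + 1) : Nat) = 2 ^ (a + 1) by simp [Nat.shiftLeft_eq],
      show (1 <<< (a + 1 - 1) : Nat) = 2 ^ a by simp [Nat.shiftLeft_eq],
      show ((2 ^ (a + 1) : Nat) : Int) + ((2 ^ a : Nat) : Int) - 1
        = ((2 ^ (a + 1) + 2 ^ a - 1 : Nat) : Int) by omega]
    have hres := pvDnPass g p hp (a + 1) (by omega) g.length (2 ^ (a + 1) + 2 ^ a - 1)
      (by omega) ⟨0, by omega⟩ st hinv.1 hinv.2.1 (by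
        intro i hi
        by_cases hcv : a + 1 ≤ pvVal i
        · rw [hinv.2.2 i hi, if_pos hcv, if_pos (Or.inl hcv)]
        · rw [hinv.2.2 i hi, if_neg hcv]
          by_cases hcc : pvVal i = (a + 1) - 1 ∧ (i < 2 ^ (a + 1) + 2 ^ a - 1 ∨ i + 1 = 2 ^ ((a + 1) - 1))
          · rw [if_pos (Or.inr hcc)]
            obtain ⟨hva, hor⟩ := hcc
            simp only [Nat.add_sub_cancel] at hva hor
            have h1 : i + 1 = 2 ^ a := by
              rcases hor with h | h
              · obtain ⟨u, hu⟩ := (pvVal_dvd_iff i a).mpr (le_of_eq hva.symm)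
                have hu1 : 1 ≤ u := by
                  rcases Nat.eq_zero_or_pos u with h0 | h1
                  · subst h0; simp at hu
                  · exact h1
                have hu3 : u < 3 := Nat.lt_of_mul_lt_mul_left (a := 2 ^ a)
                  (by rw [← hu]; omega)
                have hu2 : u ≠ 2 := by
                  intro h2
                  have hdv : 2 ^ (a + 1) ∣ i + 1 := ⟨1, by rw [hu, h2, pow_succ]; ring⟩
                  have := (pvVal_dvd_iff i (a + 1)).mp hdv
                  omega
                have : u = 1 := by omega
                rw [hu, this, mul_one]
              · exact h
            rw [hva, h1, Nat.sub_self]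
          · rw [if_neg (by
              rintro (hc | hc)
              · exact hcv hc
              · exact hcc hc)]
      )
    simpa [Nat.add_sub_cancel] using hres

-- ---------- assembling both sides ----------

lemma pvSp_self (g p : List Int) (s : Nat) : pvSp g p s s = (g.getD s 0, p.getD s 0) := by
  cases s <;> simp [pvSp]

lemma pvUpInit (g p : List Int) : pvUpInv g p 0 (g, p) := by
  refine ⟨rfl, rfl, fun i hi => ?_⟩
  rw [show min 0 (pvVal i) = 0 by omega, pow_zero, show i + 1 - 1 = i by omega, pvSp_self]
  rfl

lemma pvUpToDn (g p : List Int) (st : List Int × List Int)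
    (h : pvUpInv g p (PySem.Int.bitLength (g.length : Int) - 1) st) :
    pvDnInv g p (PySem.Int.bitLength (g.length : Int) - 1) st := by
  refine ⟨h.1, h.2.1, fun i hi => ?_⟩
  rw [h.2.2 i hi]
  have hv := pvVal_lt g i hi
  rw [show min (PySem.Int.bitLength (g.length : Int) - 1) (pvVal i) = pvVal i by omega]
  by_cases hc : PySem.Int.bitLength (g.length : Int) - 1 ≤ pvVal i
  · rw [if_pos hc]
    -- here i+1 must be exactly 2^(pvVal i)
    have h3 : g.length < 2 ^ (PySem.Int.bitLength (g.length : Int)) := by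
      have := PySem.Int.lt_two_pow_bitLength ((g.length : Nat) : Int)
      rwa [Int.natAbs_natCast] at this
    have hL1 : 1 ≤ PySem.Int.bitLength (g.length : Int) := by
      by_contra hl
      have : PySem.Int.bitLength (g.length : Int) = 0 := by omega
      rw [this] at h3
      simp at h3
      omega
    have hveq : pvVal i = PySem.Int.bitLength (g.length : Int) - 1 := by omega
    obtain ⟨u, hu⟩ := (pvVal_dvd_iff i (pvVal i)).mpr le_rfl
    have huodd : ¬ 2 ∣ u := by
      rintro ⟨w, hw⟩
      have hdv : 2 ^ (pvVal i + 1) ∣ i + 1 := ⟨w, by rw [hu, hw, pow_succ]; ring⟩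
      have := (pvVal_dvd_iff i (pvVal i + 1)).mp hdv
      omega
    have hu1 : 1 ≤ u := by
      rcases Nat.eq_zero_or_pos u with h0 | h1
      · subst h0; simp at hu
      · exact h1
    have hu2 : u = 1 := by
      by_contra hne
      have hu3 : 3 ≤ u := by omega
      have hbig : 2 ^ (pvVal i) * 3 ≤ 2 ^ (pvVal i) * u := Nat.mul_le_mul_left _ hu3
      have hpow : 2 ^ (PySem.Int.bitLength (g.length : Int))
          = 2 * 2 ^ (pvVal i) := by
        rw [hveq, ← pow_succ']
        congr 1
        omega
      omega
    rw [hu, hu2, mul_one, Nat.sub_self]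
  · rw [if_neg hc]

lemma pvCarryLoop (xs : List Int) (n : Nat) :
    ∀ k, k ≤ n →
    (PySem.List.pyRange 0 (k : Int) 1).foldl
      (fun c i => PySem.List.pySetD c (i + 1) (PySem.List.pyGetD xs i 0)) (List.replicate (n+1) 0)
      = 0 :: ((List.range k).map (fun j => xs.getD j 0) ++ List.replicate (n - k) 0) := by
  intro k
  induction k with
  | zero =>
    intro _
    rw [PySem.List.pyRange_one_eq_nil (by norm_num), List.foldl_nil]
    simp [List.replicate_succ]
  | succ k ih =>
    intro hk
    rw [show ((k + 1 : Nat) : Int) = ((k : Nat) : Int) + 1 by push_cast; ring,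
      PySem.List.pyRange_one_succ_right (by positivity), List.foldl_append, ih (by omega)]
    simp only [List.foldl_cons, List.foldl_nil]
    rw [show ((k : Int) + 1) = ((k + 1 : Nat) : Int) by push_cast; ring,
      PySem.List.pySetD_natCast, PySem.List.pyGetD_natCast]
    rw [show n - k = (n - (k+1)) + 1 by omega, List.replicate_succ]
    rw [show (0 : Int) :: ((List.range k).map (fun j => xs.getD j 0) ++ (0 : Int) :: List.replicate (n - (k+1)) 0)
        = ((0 : Int) :: (List.range k).map (fun j => xs.getD j 0)) ++ (0 : Int) :: List.replicate (n - (k+1)) 0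
        from rfl]
    rw [List.set_append, if_neg (by simp)]
    simp [List.range_succ]

lemma pvB_fold (g p : List Int) (hp : g.length ≤ p.length) :
    ∀ k, k ≤ g.length →
    ((g.zip p).take k).foldl
      (fun c gp => c ++ [PySem.Int.bor gp.1 (PySem.Int.band gp.2 (PySem.List.pyGetD c (-1) 0))]) [0]
      = (List.range (k+1)).map (pvC g p) := by
  intro k
  induction k with
  | zero =>
    intro _
    simp [pvC, List.range_one]
  | succ k ih =>
    intro hk
    have hk' : k < g.length := by omega
    have hkz : k < (g.zip p).length := by rw [List.length_zip]; omega
    rw [List.take_add_one, List.foldl_append, ih (by omega),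
      List.getElem?_eq_getElem hkz, List.getElem_zip]
    simp only [Option.toList_some, List.foldl_cons, List.foldl_nil]
    have hsplit : (List.range (k+1)).map (pvC g p)
        = (List.range k).map (pvC g p) ++ [pvC g p k] := by
      rw [List.range_succ, List.map_append, List.map_cons, List.map_nil]
    rw [hsplit, PySem.List.pyGetD_neg_one_append_singleton, ← hsplit,
      show List.range (k+1+1) = List.range (k+1) ++ [k+1] from List.range_succ,
      List.map_append, List.map_cons, List.map_nil]
    congr 1
    rw [show pvC g p (k+1) = PySem.Int.bor (g.getD k 0) (PySem.Int.band (p.getD k 0) (pvC g p k)) from rfl]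
    rw [List.getD_eq_getElem?_getD, List.getElem?_eq_getElem hk',
      List.getD_eq_getElem?_getD (l := p), List.getElem?_eq_getElem (by omega : k < p.length)]
    rfl

lemma pvA_eq (g p : List Int) (hp : g.length ≤ p.length) :
    exact_prefix_bk_py g p = (List.range (g.length + 1)).map (pvC g p) := by
  by_cases hg : g.length = 0
  · obtain rfl : g = [] := List.length_eq_zero_iff.mp hg
    simp [exact_prefix_bk_py, PySem.List.len_eq, pvC, PySem.List.pyRange_one_eq_nil,
      PySem.List.pyRange_neg_one_eq_nil, List.range_succ]
  · have hL1 : 1 ≤ PySem.Int.bitLength (g.length : Int) := by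
      rcases Nat.eq_zero_or_pos (PySem.Int.bitLength (g.length : Int)) with h0 | h1
      · exfalso
        have h3 := PySem.Int.lt_two_pow_bitLength ((g.length : Nat) : Int)
        rw [Int.natAbs_natCast, h0] at h3
        rw [pow_zero, Nat.lt_one_iff] at h3
        exact hg h3
      · exact h1
    unfold exact_prefix_bk_py
    simp only [PySem.List.len_eq]
    have h1 := pvUpOuter g p hp (PySem.Int.bitLength (g.length : Int)) 1 le_rfl (by omega)
      (g, p) (pvUpInit g p)
    simp only [Nat.cast_one] at h1
    have h2 := pvDnOuter g p hp (PySem.Int.bitLength (g.length : Int) - 1) _ (pvUpToDn g p _ h1)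
    rw [show ((PySem.Int.bitLength ((g.length : Nat) : Int) : Nat) : Int) - 1
        = ((PySem.Int.bitLength ((g.length : Nat) : Int) - 1 : Nat) : Int) by omega]
    rw [pvCarryLoop _ g.length g.length le_rfl, Nat.sub_self, List.replicate_zero, List.append_nil]
    rw [List.range_succ_eq_map, List.map_cons, List.map_map]
    congr 1
    apply List.map_congr_left
    intro j hj
    have hjn : j < g.length := List.mem_range.mp hj
    have hc := h2.2.2 j hjn
    rw [if_pos (Nat.zero_le _)] at hc
    have : ((List.foldl
          (fun st d =>
            List.foldl (fun st i => pvBkStep st i ((1 <<< (d.toNat - 1) : Nat) : Int)) st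
              (PySem.List.pyRange (((1 <<< d.toNat : Nat) : Int) + ((1 <<< (d.toNat - 1) : Nat) : Int) - 1) (g.length : Int) ((1 <<< d.toNat : Nat) : Int)))
          (List.foldl
            (fun st d =>
              List.foldl (fun st i => pvBkStep st i ((1 <<< (d.toNat - 1) : Nat) : Int)) st
                (PySem.List.pyRange (((1 <<< d.toNat : Nat) : Int) - 1) (g.length : Int) ((1 <<< d.toNat : Nat) : Int)))
            (g, p) (PySem.List.pyRange 1 ((PySem.Int.bitLength ((g.length : Nat) : Int) : Nat) : Int)))
          (PySem.List.pyRange (((PySem.Int.bitLength ((g.length : Nat) : Int) - 1 : Nat) : Int)) 0 (-1))).1).getD j 0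
        = (pvSp g p 0 j).1 := by rw [show ∀ st2 : List Int × List Int, st2.1.getD j 0 = (pvCell st2 j).1 from fun _ => rfl, hc]
    rw [this, ← pvC_eq_sp]
    rfl

lemma pvB_eq (g p : List Int) (hp : g.length ≤ p.length) :
    exact_prefix_bk_py_alt g p = (List.range (g.length + 1)).map (pvC g p) := by
  have hlen : (g.zip p).length = g.length := by rw [List.length_zip]; omega
  unfold exact_prefix_bk_py_alt
  rw [← List.take_of_length_le (le_of_eq hlen), pvB_fold g p hp g.length le_rfl]

-- ===== VERDICT (by name: the statement is the Claim_ definition above) =====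
theorem exact_prefix_bk_py_spec : Claim_equal_exact_prefix_bk_py := by
  intro g p _ hpre
  unfold Spec_exact_prefix_bk_py
  rw [pvA_eq g p hpre, pvB_eq g p hpre]
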